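-- pv_equiv track=rewrite | github.com/rishi-optiminastic/Rankking-Be | apps/analyzer/pipeline/technical.py | _check_robots_allows_ai
-- ===== SOURCE A (Python) =====
-- AI_BOT_AGENTS = [
--     "GPTBot", "Google-Extended", "anthropic-ai", "ClaudeBot",
--     "PerplexityBot", "ChatGPT-User", "CCBot",
-- ]
--
-- def _check_robots_allows_ai(robots_txt: str) -> tuple[bool, list[str]]:
--     blocked = []
--     if not robots_txt:
--         return True, []
--
--     lines = robots_txt.lower().splitlines()
--     current_agent = None
--     for line in lines:
--         line = line.strip()
--         if line.startswith("user-agent:"):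
--             current_agent = line.split(":", 1)[1].strip()
--         elif line.startswith("disallow:") and current_agent:
--             path = line.split(":", 1)[1].strip()
--             if path == "/" or path == "/*":
--                 for bot in AI_BOT_AGENTS:
--                     if current_agent == "*" or bot.lower() in current_agent:
--                         blocked.append(bot)
--
--     allows = len(blocked) == 0
--     return allows, blocked
-- ===== SOURCE B (Python) =====
-- AI_BOT_AGENTS = [
--     "GPTBot", "Google-Extended", "anthropic-ai", "ClaudeBot",
--     "PerplexityBot", "ChatGPT-User", "CCBot",
-- ]
--
-- def _check_robots_allows_ai(robots_txt: str) -> tuple[bool, list[str]]: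
--     # Pass 1: parse robots.txt into ordered (agent, paths) groups.
--     groups = []
--     for raw in robots_txt.lower().splitlines():
--         line = raw.strip()
--         if line.startswith("user-agent:"):
--             groups.append((line.split(":", 1)[1].strip(), []))
--         elif line.startswith("disallow:") and groups:
--             groups[-1][1].append(line.split(":", 1)[1].strip())
--     # Pass 2: collect AI bots blocked by a full-site disallow, in document order.
--     blocked = []
--     for agent, paths in groups:
--         for path in paths:
--             if path == "/" or path == "/*":
--                 for bot in AI_BOT_AGENTS:
--                     if agent == "*" or bot.lower() in agent:
--                         blocked.append(bot)
--     return not blocked, blocked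
-- ===== Notes on version B (the rewrite author's own statement) =====
-- stated objective: alternative
-- what changed: A interleaves parsing and bot-matching in one stateful line scan; B first parses robots.txt into an ordered list of (agent, disallow-paths) groups, then a second pass scans the groups to collect blocked AI bots.
import Mathlib
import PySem

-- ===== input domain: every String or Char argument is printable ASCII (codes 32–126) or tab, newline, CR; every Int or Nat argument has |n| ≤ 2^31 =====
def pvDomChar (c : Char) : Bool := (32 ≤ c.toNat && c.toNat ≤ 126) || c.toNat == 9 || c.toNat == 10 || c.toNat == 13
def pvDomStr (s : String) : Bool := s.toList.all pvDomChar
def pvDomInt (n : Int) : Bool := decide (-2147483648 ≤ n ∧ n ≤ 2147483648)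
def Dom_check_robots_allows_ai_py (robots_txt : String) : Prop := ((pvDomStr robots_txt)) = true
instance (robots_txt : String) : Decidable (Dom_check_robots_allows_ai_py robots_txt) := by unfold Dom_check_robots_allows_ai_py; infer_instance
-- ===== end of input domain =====

-- B re-decomposes A's single stateful scan into parse-into-(agent,paths)-groups then scan-groups; same values, objective: alternative decomposition.

-- shared module constant
def aiBots : List String :=
  ["GPTBot", "Google-Extended", "anthropic-ai", "ClaudeBot",
   "PerplexityBot", "ChatGPT-User", "CCBot"]

-- line.split(":", 1)[1].strip() (both Pythons perform this on lines known to contain ':')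
def afterColon (line : String) : String :=
  PySem.Str.strip (((PySem.Str.splitMax? line ":" 1).getD []).getD 1 "")

-- ===== PORT A =====
-- one fold over the lines carrying (current_agent, blocked)
def aStep (st : Option String × List String) (line0 : String) : Option String × List String :=
  let line := PySem.Str.strip line0
  if PySem.Str.startswith line "user-agent:" then
    (some (afterColon line), st.2)
  else
    match st.1 with
    | some ca =>
      if PySem.Str.startswith line "disallow:" && !(ca == "") then
        let path := afterColon line
        if path == "/" || path == "/*" then
          (st.1, aiBots.foldl (fun bl bot =>
            if ca == "*" || PySem.Str.isIn (PySem.Str.lower bot) ca then bl ++ [bot] else bl) st.2)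
        else st
      else st
    | none => st

def check_robots_allows_ai_py (robots_txt : String) : Bool × List String :=
  if robots_txt == "" then (true, [])
  else
    let st := (PySem.Str.splitlines (PySem.Str.lower robots_txt)).foldl aStep (none, [])
    (st.2.length == 0, st.2)

-- ===== PORT B =====
-- pass 1: build the ordered group list
def bStep (gs : List (String × List String)) (line0 : String) : List (String × List String) :=
  let line := PySem.Str.strip line0
  if PySem.Str.startswith line "user-agent:" then
    gs ++ [(afterColon line, [])]
  else if PySem.Str.startswith line "disallow:" then
    match gs.getLast? with
    | some (a, ps) => gs.dropLast ++ [(a, ps ++ [afterColon line])]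
    | none => gs
  else gs

-- the AI bots blocked for one agent string
def botsFor (agent : String) : List String :=
  aiBots.foldl (fun b bot =>
    if agent == "*" || PySem.Str.isIn (PySem.Str.lower bot) agent then b ++ [bot] else b) []

def check_robots_allows_ai_py_alt (robots_txt : String) : Bool × List String :=
  let gs := (PySem.Str.splitlines (PySem.Str.lower robots_txt)).foldl bStep []
  -- pass 2: scan groups in order
  let blocked := gs.foldl (fun bl g =>
    g.2.foldl (fun bl p => if p == "/" || p == "/*" then bl ++ botsFor g.1 else bl) bl) []
  (blocked.isEmpty, blocked)

-- ===== PRECONDITION & SPEC =====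
def Spec_check_robots_allows_ai_py (robots_txt : String) (out : Bool × List String) : Prop := out = check_robots_allows_ai_py_alt robots_txt
instance (robots_txt : String) (out : Bool × List String) : Decidable (Spec_check_robots_allows_ai_py robots_txt out) := by unfold Spec_check_robots_allows_ai_py; infer_instance

-- ===== CLAIM (what is proved, stated in full; the proofs are below) =====
def Claim_equal_check_robots_allows_ai_py : Prop := ∀ (robots_txt : String), Dom_check_robots_allows_ai_py robots_txt → Spec_check_robots_allows_ai_py robots_txt (check_robots_allows_ai_py robots_txt)

-- ===== LEMMAS AND PROOFS =====

-- what one disallow path contributes for a given agent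
def emitB (a p : String) : List String := if p == "/" || p == "/*" then botsFor a else []

-- what one group contributes
def scanG (g : String × List String) : List String := g.2.flatMap (emitB g.1)

def scanGs (gs : List (String × List String)) : List String := gs.flatMap scanG

def agOf (gs : List (String × List String)) : Option String := gs.getLast?.map (·.1)

theorem botsFor_empty : botsFor "" = [] := by decide

theorem botsFor_eq_filter (a : String) :
    botsFor a = aiBots.filter (fun bot => a == "*" || PySem.Str.isIn (PySem.Str.lower bot) a) := by
  unfold botsFor
  rw [PySem.List.foldl_append_if_eq_filter]
  simp

-- A's inline bot loop appends botsFor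
theorem a_inner (ca : String) (init : List String) :
    aiBots.foldl (fun bl bot =>
      if ca == "*" || PySem.Str.isIn (PySem.Str.lower bot) ca then bl ++ [bot] else bl) init
    = init ++ botsFor ca := by
  rw [PySem.List.foldl_append_if_eq_filter, botsFor_eq_filter]

-- B's nested collection loop computes scanGs
theorem b_inner (g : String × List String) (bl : List String) :
    g.2.foldl (fun bl p => if p == "/" || p == "/*" then bl ++ botsFor g.1 else bl) bl
    = bl ++ scanG g := by
  have : ∀ bl, g.2.foldl (fun bl p => if p == "/" || p == "/*" then bl ++ botsFor g.1 else bl) bl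
      = g.2.foldl (fun bl p => bl ++ emitB g.1 p) bl := by
    intro bl
    refine PySem.List.foldl_congr_mem _ _ _ _ ?_
    intro acc p _
    unfold emitB
    by_cases h : (p == "/" || p == "/*") = true <;> simp [h]
  rw [this, PySem.List.foldl_append_eq_flatMap]
  rfl

theorem b_blocked (gs : List (String × List String)) (init : List String) :
    gs.foldl (fun bl g =>
      g.2.foldl (fun bl p => if p == "/" || p == "/*" then bl ++ botsFor g.1 else bl) bl) init
    = init ++ scanGs gs := by
  induction gs generalizing init with
  | nil => simp [scanGs]
  | cons g t ih =>
    rw [List.foldl_cons, b_inner, ih]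
    simp [scanGs]

theorem emitB_empty (q : String) : emitB "" q = [] := by
  unfold emitB; split <;> simp [botsFor_empty]

theorem scanGs_snoc (a : String) (ps : List String) (q : String)
    (gs' : List (String × List String)) :
    scanGs (gs' ++ [(a, ps ++ [q])]) = scanGs (gs' ++ [(a, ps)]) ++ emitB a q := by
  simp [scanGs, scanG, List.append_assoc]

-- one line keeps the simulation between A's state and B's groups
theorem step_sim (gs : List (String × List String)) (x : String) :
    aStep (agOf gs, scanGs gs) x = (agOf (bStep gs x), scanGs (bStep gs x)) := by
  unfold aStep bStep
  by_cases hu : PySem.Str.startswith (PySem.Str.strip x) "user-agent:" = true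
  · simp only [hu]
    simp [agOf, scanGs, scanG]
  · simp only [hu, Bool.false_eq_true, if_false]
    by_cases hd : PySem.Str.startswith (PySem.Str.strip x) "disallow:" = true
    · simp only [hd, if_true]
      rcases List.eq_nil_or_concat gs with rfl | ⟨gs', ⟨a, ps⟩, rfl⟩
      · simp [agOf, scanGs]
      · simp only [List.concat_eq_append]
        have hlast : (gs' ++ [(a, ps)]).getLast? = some (a, ps) := by simp
        have hag : agOf (gs' ++ [(a, ps)]) = some a := by simp [agOf]
        rw [hag, hlast]
        simp only [List.dropLast_concat]
        by_cases ha : a = ""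
        · subst ha
          simp only [beq_self_eq_true, Bool.not_true, Bool.and_false, Bool.false_eq_true, if_false]
          rw [scanGs_snoc, emitB_empty]
          simp [agOf]
        · have ha' : ((true : Bool) && !(a == "")) = true := by simp [ha]
          simp only [ha', if_true]
          by_cases hp : (afterColon (PySem.Str.strip x) == "/" || afterColon (PySem.Str.strip x) == "/*") = true
          · simp only [hp, if_true]
            rw [a_inner, scanGs_snoc]
            simp [agOf, emitB, hp]
          · simp only [hp, Bool.false_eq_true, if_false]
            rw [scanGs_snoc]
            simp [agOf, emitB, hp]
    · simp only [hd, Bool.false_eq_true, if_false]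
      rcases h : agOf gs with _ | a <;> simp

theorem fold_sim (l : List String) (gs : List (String × List String)) :
    l.foldl aStep (agOf gs, scanGs gs) = (agOf (l.foldl bStep gs), scanGs (l.foldl bStep gs)) := by
  induction l generalizing gs with
  | nil => rfl
  | cons x t ih => rw [List.foldl_cons, step_sim, List.foldl_cons, ih]

-- ===== VERDICT =====
theorem check_robots_allows_ai_py_spec : Claim_equal_check_robots_allows_ai_py := by
  unfold Claim_equal_check_robots_allows_ai_py
  intro s _
  unfold Spec_check_robots_allows_ai_py check_robots_allows_ai_py check_robots_allows_ai_py_alt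
  by_cases h : s = ""
  · subst h; decide
  · have hne : (s == "") = false := by simp [h]
    simp only [hne, Bool.false_eq_true, if_false]
    have h0 : ((none : Option String), ([] : List String)) = (agOf [], scanGs []) := rfl
    rw [h0, fold_sim, b_blocked]
    cases scanGs ((PySem.Str.splitlines (PySem.Str.lower s)).foldl bStep []) <;> simp
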